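-- pv_equiv track=rewrite | github.com/kh277/BOJ | 백준/Gold/34031. 하이터치☆메모리/하이터치☆메모리.py | solve
-- ===== SOURCE A (Python) =====
-- def solve(A, B):
--     # A에서 괄호 처리
--     openA = [0 for _ in range(len(A)+1)]
--     curBrac = 0
--     for i in range(len(A)):
--         # 괄호 개수 처리
--         if A[i] == '(':
--             curBrac += 1
--         else:
--             curBrac -= 1
--
--         # A의 괄호 개수가 음수가 되면 이후 접두사는 전부 불가
--         if curBrac < 0:
--             break
--         openA[curBrac] += 1
--
--     # B에서 괄호 처리
--     openB = [0 for _ in range(len(A)+1)]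
--     curBrac = 0
--     minP = 0
--     for i in range(len(B)):
--         # 괄호 개수 처리
--         if B[i] == '(':
--             curBrac += 1
--         else:
--             curBrac -= 1
--
--         # curBrac == minP <= 0일 때만 카운트
--         if curBrac <= 0 and curBrac <= minP:
--             if -curBrac <= len(A):
--                 openB[-curBrac] += 1
--         if curBrac < minP:
--                 minP = curBrac
--
--     result = 0
--     for i in range(len(A)+1):
--         result += openA[i]*openB[i]
--
--     return result
-- ===== SOURCE B (Python) =====
-- def solve(A, B):
--     # Collect the two depth multisets as plain lists, sort them, and count
--     # matching pairs with a run-block two-pointer merge (no histogram tables,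
--     # no dot-product pass).
--     dA = []
--     cur = 0
--     for ch in A:
--         cur += 1 if ch == '(' else -1
--         if cur < 0:
--             break
--         dA.append(cur)
--     dB = []
--     cur = 0
--     minP = 0
--     for ch in B:
--         cur += 1 if ch == '(' else -1
--         if cur <= 0 and cur <= minP:
--             dB.append(-cur)
--         if cur < minP:
--             minP = cur
--     dA.sort()
--     dB.sort()
--     result = 0
--     i = j = 0
--     while i < len(dA) and j < len(dB):
--         if dA[i] < dB[j]:
--             i += 1
--         elif dB[j] < dA[i]:
--             j += 1
--         else:
--             v = dA[i]
--             i2 = i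
--             while i2 < len(dA) and dA[i2] == v:
--                 i2 += 1
--             j2 = j
--             while j2 < len(dB) and dB[j2] == v:
--                 j2 += 1
--             result += (i2 - i) * (j2 - j)
--             i, j = i2, j2
--     return result
-- ===== Notes on version B (the rewrite author's own statement) =====
-- stated objective: alternative
-- what changed: Replaces the two depth-indexed histogram arrays and the final dot-product pass by collecting the two depth multisets as plain lists, sorting both, and counting matching pairs with a run-block two-pointer merge (no tables, no bound check, no combine loop).
import Mathlib
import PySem

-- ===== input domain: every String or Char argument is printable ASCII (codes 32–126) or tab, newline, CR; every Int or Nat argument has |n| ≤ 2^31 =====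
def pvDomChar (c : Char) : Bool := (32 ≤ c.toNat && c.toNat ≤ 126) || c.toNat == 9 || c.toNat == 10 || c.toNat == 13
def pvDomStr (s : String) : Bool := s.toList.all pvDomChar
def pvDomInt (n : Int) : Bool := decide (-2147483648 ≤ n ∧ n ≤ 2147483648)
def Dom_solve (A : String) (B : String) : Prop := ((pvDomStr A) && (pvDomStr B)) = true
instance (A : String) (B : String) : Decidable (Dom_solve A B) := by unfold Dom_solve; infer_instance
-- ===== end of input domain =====

-- B replaces the histogram arrays and the dot-product pass by collecting the two depth
-- multisets as lists, sorting both, and counting matches with a run-block two-pointer merge.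

-- ===== PORT A =====
-- state: (openA array, curBrac, broke-out-of-loop flag)
def stepA (s : List Int × Int × Bool) (c : Char) : List Int × Int × Bool :=
  if s.2.2 then s else
  let cur := if c = '(' then s.2.1 + 1 else s.2.1 - 1
  if cur < 0 then (s.1, cur, true)
  else (s.1.set cur.toNat (s.1.getD cur.toNat 0 + 1), cur, false)

-- state: (openB array, curBrac, minP)
def stepB (n : Nat) (s : List Int × Int × Int) (c : Char) : List Int × Int × Int :=
  let cur := if c = '(' then s.2.1 + 1 else s.2.1 - 1
  let arr := if cur ≤ 0 ∧ cur ≤ s.2.2 then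
               (if -cur ≤ (n : Int) then s.1.set (-cur).toNat (s.1.getD (-cur).toNat 0 + 1) else s.1)
             else s.1
  (arr, cur, if cur < s.2.2 then cur else s.2.2)

def solve (A : String) (B : String) : Int :=
  let n := A.toList.length
  let openA := (A.toList.foldl stepA (List.replicate (n+1) 0, 0, false)).1
  let openB := (B.toList.foldl (stepB n) (List.replicate (n+1) 0, 0, 0)).1
  (List.range (n+1)).foldl (fun r i => r + openA.getD i 0 * openB.getD i 0) 0

-- ===== PORT B =====
-- state: (collected depth list dA, curBrac, broke-out-of-loop flag)
def stepCA (s : List Int × Int × Bool) (c : Char) : List Int × Int × Bool :=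
  if s.2.2 then s else
  let cur := if c = '(' then s.2.1 + 1 else s.2.1 - 1
  if cur < 0 then (s.1, cur, true)
  else (s.1 ++ [cur], cur, false)

-- state: (collected depth list dB, curBrac, minP)
def stepCB (s : List Int × Int × Int) (c : Char) : List Int × Int × Int :=
  let cur := if c = '(' then s.2.1 + 1 else s.2.1 - 1
  let l := if cur ≤ 0 ∧ cur ≤ s.2.2 then s.1 ++ [-cur] else s.1
  (l, cur, if cur < s.2.2 then cur else s.2.2)

-- the inner 'while … == v' run scans: run length and remaining suffix
def countRun (v : Int) : List Int → Nat × List Int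
  | [] => (0, [])
  | x :: t => if x = v then ((countRun v t).1 + 1, (countRun v t).2) else (0, x :: t)

-- the index-based two-pointer while loop, ported as recursion on the two list
-- suffixes; fuel = total length bounds the iteration count (each step consumes
-- at least one element), making the recursion structural
def mergeFuel : Nat → List Int → List Int → Int → Int
  | 0, _, _, res => res
  | _ + 1, [], _, res => res
  | _ + 1, _ :: _, [], res => res
  | f + 1, x :: xs, y :: ys, res =>
    if x < y then mergeFuel f xs (y :: ys) res
    else if y < x then mergeFuel f (x :: xs) ys res
    else
      mergeFuel f (countRun x xs).2 (countRun x ys).2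
        (res + (((countRun x xs).1 : Int) + 1) * (((countRun x ys).1 : Int) + 1))

def solve_alt (A : String) (B : String) : Int :=
  let dA := PySem.List.sorted (A.toList.foldl stepCA ([], 0, false)).1 (fun x => x) false
  let dB := PySem.List.sorted (B.toList.foldl stepCB ([], 0, 0)).1 (fun x => x) false
  mergeFuel (dA.length + dB.length) dA dB 0

-- ===== PRECONDITION & SPEC =====
def Spec_solve (A : String) (B : String) (out : Int) : Prop := out = solve_alt A B
instance (A : String) (B : String) (out : Int) : Decidable (Spec_solve A B out) := by unfold Spec_solve; infer_instance

-- ===== CLAIM (what is proved, stated in full; the proofs are below) =====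
def Claim_equal_solve : Prop := ∀ (A : String) (B : String), Dom_solve A B → Spec_solve A B (solve A B)

-- ===== LEMMAS AND PROOFS =====

theorem getD_set (l : List Int) (i j : Nat) (a : Int) (hi : i < l.length) :
    (l.set i a).getD j 0 = if i = j then a else l.getD j 0 := by
  rw [List.getD_eq_getElem?_getD, List.getElem?_set_of_lt' _ _ hi]
  split
  · simp
  · rw [← List.getD_eq_getElem?_getD]

theorem stepA_true (arr : List Int) (cur : Int) (c : Char) :
    stepA (arr, cur, true) c = (arr, cur, true) := rfl

theorem stepCA_true (lst : List Int) (cur : Int) (c : Char) :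
    stepCA (lst, cur, true) c = (lst, cur, true) := rfl

theorem stepA_false (arr : List Int) (cur cur' : Int) (c : Char)
    (h : cur' = if c = '(' then cur + 1 else cur - 1) :
    stepA (arr, cur, false) c =
      if cur' < 0 then (arr, cur', true)
      else (arr.set cur'.toNat (arr.getD cur'.toNat 0 + 1), cur', false) := by
  subst h; rfl

theorem stepCA_false (lst : List Int) (cur cur' : Int) (c : Char)
    (h : cur' = if c = '(' then cur + 1 else cur - 1) :
    stepCA (lst, cur, false) c =
      if cur' < 0 then (lst, cur', true)
      else (lst ++ [cur'], cur', false) := by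
  subst h; rfl

theorem stepB_eq (n : Nat) (arr : List Int) (cur minP cur' : Int) (c : Char)
    (h : cur' = if c = '(' then cur + 1 else cur - 1) :
    stepB n (arr, cur, minP) c =
      ((if cur' ≤ 0 ∧ cur' ≤ minP then
          (if -cur' ≤ (n : Int) then arr.set (-cur').toNat (arr.getD (-cur').toNat 0 + 1) else arr)
        else arr),
       cur', if cur' < minP then cur' else minP) := by
  subst h; rfl

theorem stepCB_eq (lst : List Int) (cur minP cur' : Int) (c : Char)
    (h : cur' = if c = '(' then cur + 1 else cur - 1) :
    stepCB (lst, cur, minP) c =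
      ((if cur' ≤ 0 ∧ cur' ≤ minP then lst ++ [-cur'] else lst),
       cur', if cur' < minP then cur' else minP) := by
  subst h; rfl

-- A-side array scan ↔ B-side list scan over A: the array holds the counts of the list
theorem scanA_corr (l : List Char) (arr : List Int) (lst : List Int)
    (cur : Int) (done : Bool)
    (hb : done = false → cur + l.length < (arr.length : Int))
    (hinv : ∀ k : Nat, k < arr.length → arr.getD k 0 = ((lst.count (k:Int) : Nat) : Int)) :
    (l.foldl stepA (arr, cur, done)).1.length = arr.length ∧
    ∀ k : Nat, k < arr.length →
      (l.foldl stepA (arr, cur, done)).1.getD k 0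
        = (((l.foldl stepCA (lst, cur, done)).1.count (k:Int) : Nat) : Int) := by
  induction l generalizing arr lst cur done with
  | nil => exact ⟨rfl, hinv⟩
  | cons c t ih =>
    cases done with
    | true =>
      simp only [List.foldl_cons, stepA_true, stepCA_true]
      exact ih arr lst cur true (by simp) hinv
    | false =>
      have hb' := hb rfl
      simp only [List.length_cons] at hb'
      set cur' := if c = '(' then cur + 1 else cur - 1 with hc
      simp only [List.foldl_cons, stepA_false arr cur cur' c hc, stepCA_false lst cur cur' c hc]
      have hcur' : cur' ≤ cur + 1 := by rw [hc]; split <;> omega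
      by_cases hneg : cur' < 0
      · rw [if_pos hneg, if_pos hneg]
        exact ih arr lst cur' true (by simp) hinv
      · rw [if_neg hneg, if_neg hneg]
        have hlt : cur'.toNat < arr.length := by omega
        have hrec := ih (arr.set cur'.toNat (arr.getD cur'.toNat 0 + 1))
            (lst ++ [cur']) cur' false ?_ ?_
        · exact ⟨by rw [hrec.1, List.length_set], by
            intro k hk
            exact hrec.2 k (by simpa using hk)⟩
        · intro _
          simp only [List.length_set]
          push_cast at hb' ⊢
          omega
        · intro k hk
          simp only [List.length_set] at hk
          rw [getD_set _ _ _ _ hlt, List.count_append, hinv k hk]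
          by_cases hke : cur'.toNat = k
          · have : (k : Int) = cur' := by omega
            rw [if_pos hke, hinv cur'.toNat hlt, this]
            have hcnt : List.count cur' [cur'] = 1 := by simp
            rw [hcnt]
            have : (cur'.toNat : Int) = cur' := by omega
            rw [this]
            push_cast
            ring
          · have hne : (k : Int) ≠ cur' := by omega
            rw [if_neg hke]
            have hcnt : List.count (k : Int) [cur'] = 0 := by
              simp only [List.count_singleton, beq_iff_eq]
              rw [if_neg (by omega)]
            rw [hcnt]
            push_cast
            ring

-- elements collected from A are nonnegative and below start depth + 1 + length
theorem collectA_bound (l : List Char) (lst : List Int) (cur : Int) (done : Bool) :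
    ∀ a ∈ (l.foldl stepCA (lst, cur, done)).1,
      a ∈ lst ∨ (0 ≤ a ∧ a < cur + 1 + l.length) := by
  induction l generalizing lst cur done with
  | nil => intro a ha; exact Or.inl ha
  | cons c t ih =>
    cases done with
    | true =>
      simp only [List.foldl_cons, stepCA_true]
      intro a ha
      rcases ih lst cur true a ha with h | h
      · exact Or.inl h
      · right; simp only [List.length_cons]; push_cast; omega
    | false =>
      set cur' := if c = '(' then cur + 1 else cur - 1 with hc
      have hcur' : cur' ≤ cur + 1 := by rw [hc]; split <;> omega
      simp only [List.foldl_cons, stepCA_false lst cur cur' c hc]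
      by_cases hneg : cur' < 0
      · rw [if_pos hneg]
        intro a ha
        rcases ih lst cur' true a ha with h | h
        · exact Or.inl h
        · right; simp only [List.length_cons]; push_cast; omega
      · rw [if_neg hneg]
        intro a ha
        rcases ih (lst ++ [cur']) cur' false a ha with h | h
        · rcases List.mem_append.mp h with h | h
          · exact Or.inl h
          · right
            simp only [List.mem_singleton] at h
            subst h
            simp only [List.length_cons]
            push_cast
            omega
        · right; simp only [List.length_cons]; push_cast; omega

-- B-side array scan ↔ list scan over B: the array holds the in-range counts of the list
theorem scanB_corr (n : Nat) (l : List Char) (arr : List Int) (lst : List Int)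
    (cur minP : Int)
    (hlen : arr.length = n + 1)
    (hinv : ∀ k : Nat, k < n + 1 → arr.getD k 0 = ((lst.count (k:Int) : Nat) : Int)) :
    (l.foldl (stepB n) (arr, cur, minP)).1.length = n + 1 ∧
    ∀ k : Nat, k < n + 1 →
      (l.foldl (stepB n) (arr, cur, minP)).1.getD k 0
        = (((l.foldl stepCB (lst, cur, minP)).1.count (k:Int) : Nat) : Int) := by
  induction l generalizing arr lst cur minP with
  | nil => exact ⟨hlen, hinv⟩
  | cons c t ih =>
    set cur' := if c = '(' then cur + 1 else cur - 1 with hc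
    simp only [List.foldl_cons, stepB_eq n arr cur minP cur' c hc,
               stepCB_eq lst cur minP cur' c hc]
    by_cases hev : cur' ≤ 0 ∧ cur' ≤ minP
    · rw [if_pos hev, if_pos hev]
      by_cases hrng : -cur' ≤ (n : Int)
      · rw [if_pos hrng]
        have hlt : (-cur').toNat < arr.length := by omega
        refine ih _ _ cur' _ (by simpa using hlen) ?_
        intro k hk
        rw [getD_set _ _ _ _ hlt, List.count_append, hinv k hk]
        by_cases hke : (-cur').toNat = k
        · have hkc : (k : Int) = -cur' := by omega
          rw [if_pos hke, hinv (-cur').toNat (by omega), hkc]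
          have : ((-cur').toNat : Int) = -cur' := by omega
          rw [this]
          have hcnt : List.count (-cur') [-cur'] = 1 := by simp
          rw [hcnt]
          push_cast
          ring
        · have hne : (k : Int) ≠ -cur' := by omega
          rw [if_neg hke]
          have hcnt : List.count (k : Int) [-cur'] = 0 := by
            simp only [List.count_singleton, beq_iff_eq]
            rw [if_neg (by omega)]
          rw [hcnt]
          push_cast
          ring
      · rw [if_neg hrng]
        refine ih _ _ cur' _ hlen ?_
        intro k hk
        rw [List.count_append, hinv k hk]
        have hne : (k : Int) ≠ -cur' := by omega
        have hcnt : List.count (k : Int) [-cur'] = 0 := by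
          simp only [List.count_singleton, beq_iff_eq]
          rw [if_neg (by omega)]
        rw [hcnt]
        push_cast
        ring
    · rw [if_neg hev, if_neg hev]
      exact ih _ _ cur' _ hlen hinv

theorem foldl_range_add (f : Nat → Int) (a : Int) (m : Nat) :
    (List.range m).foldl (fun r i => r + f i) a = a + ∑ i ∈ Finset.range m, f i := by
  induction m generalizing a with
  | zero => simp
  | succ k ih => rw [List.range_succ, List.foldl_append, ih, Finset.sum_range_succ]; simp; ring

-- grouping: a sum of per-element counts equals the histogram dot product
theorem group_sum (lA lB : List Int) (n : Nat)
    (hbd : ∀ a ∈ lA, 0 ≤ a ∧ a < (n : Int)) :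
    (lA.map (fun x => ((lB.count x : Nat) : Int))).sum
      = ∑ i ∈ Finset.range n, ((lA.count (i:Int) : Nat) : Int) * ((lB.count (i:Int) : Nat) : Int) := by
  induction lA with
  | nil => simp
  | cons a t ih =>
    have ha := hbd a List.mem_cons_self
    have ih' := ih (fun x hx => hbd x (List.mem_cons_of_mem _ hx))
    have key : ∑ i ∈ Finset.range n,
        (if (i : Int) = a then ((lB.count (i:Int) : Nat) : Int) else 0)
          = ((lB.count a : Nat) : Int) := by
      rw [Finset.sum_eq_single a.toNat]
      · have : ((a.toNat : Nat) : Int) = a := by omega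
        rw [if_pos this, this]
      · intro b _ hbne
        have : (b : Int) ≠ a := by omega
        rw [if_neg this]
      · intro hnot
        exact absurd (Finset.mem_range.mpr (by omega)) hnot
    simp only [List.map_cons, List.sum_cons]
    rw [ih', ← key, ← Finset.sum_add_distrib]
    apply Finset.sum_congr rfl
    intro i _
    rw [List.count_cons]
    simp only [beq_iff_eq]
    by_cases h : (i : Int) = a
    · rw [if_pos h, if_pos h.symm]
      push_cast
      ring
    · rw [if_neg h, if_neg (fun e => h e.symm)]
      push_cast
      ring

-- countRun splits off the leading run
theorem countRun_split (v : Int) (l : List Int) :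
    l = List.replicate (countRun v l).1 v ++ (countRun v l).2 := by
  induction l with
  | nil => rfl
  | cons x t ih =>
    by_cases h : x = v
    · subst h
      simp only [countRun]
      exact congrArg _ ih
    · simp [countRun, h]

-- on a sorted list all of whose elements are ≥ v, the remainder after the v-run is > v
theorem countRun_gt (v : Int) (l : List Int) (hs : l.Pairwise (· ≤ ·))
    (hge : ∀ u ∈ l, v ≤ u) : ∀ t ∈ (countRun v l).2, v < t := by
  induction l with
  | nil => simp [countRun]
  | cons x t ih =>
    by_cases h : x = v
    · subst h
      simp only [countRun]
      exact ih hs.of_cons (fun u hu => hge u (List.mem_cons_of_mem _ hu))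
    · simp only [countRun, if_neg h]
      intro u hu
      have hvx : v < x := lt_of_le_of_ne (hge x List.mem_cons_self) (fun e => h e.symm)
      rcases List.mem_cons.mp hu with rfl | hu
      · exact hvx
      · exact lt_of_lt_of_le hvx (List.rel_of_pairwise_cons hs hu)

-- the merge computes the sum over the first list of counts in the second
theorem mergeFuel_spec (f : Nat) : ∀ (a b : List Int), a.Pairwise (· ≤ ·) →
    b.Pairwise (· ≤ ·) → a.length + b.length ≤ f → ∀ res : Int,
    mergeFuel f a b res = res + (a.map (fun x => ((b.count x : Nat) : Int))).sum := by
  induction f with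
  | zero =>
    intro a b _ _ hlen res
    have ha : a = [] := by
      cases a with
      | nil => rfl
      | cons x xs => simp at hlen
    subst ha
    simp [mergeFuel]
  | succ f ih =>
    intro a b hsa hsb hlen res
    cases a with
    | nil => simp [mergeFuel]
    | cons x xs =>
      cases b with
      | nil =>
        simp [mergeFuel]
      | cons y ys =>
        simp only [mergeFuel]
        simp only [List.length_cons] at hlen
        by_cases hxy : x < y
        · rw [if_pos hxy, ih xs (y :: ys) hsa.of_cons hsb (by simp only [List.length_cons]; omega) res]
          have hnot : x ∉ y :: ys := by
            intro hmem
            rcases List.mem_cons.mp hmem with rfl | hmem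
            · omega
            · exact absurd (List.rel_of_pairwise_cons hsb hmem) (by omega)
          rw [List.map_cons, List.sum_cons, List.count_eq_zero.mpr hnot]
          push_cast
          ring
        · rw [if_neg hxy]
          by_cases hyx : y < x
          · rw [if_pos hyx, ih (x :: xs) ys hsa hsb.of_cons (by simp only [List.length_cons]; omega) res]
            have hcong : ∀ t ∈ x :: xs,
                (((y :: ys).count t : Nat) : Int) = ((ys.count t : Nat) : Int) := by
              intro t ht
              have hxt : x ≤ t := by
                rcases List.mem_cons.mp ht with rfl | ht
                · exact le_rfl
                · exact List.rel_of_pairwise_cons hsa ht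
              have h1 : t ≠ y := by omega
              have h2 : ¬ y = t := fun e => h1 e.symm
              simp [h2]
            rw [List.map_congr_left hcong]
          · rw [if_neg hyx]
            have hxy' : x = y := by omega
            subst hxy'
            -- run facts on both sides
            have hsxs : xs.Pairwise (· ≤ ·) := hsa.of_cons
            have hsys : ys.Pairwise (· ≤ ·) := hsb.of_cons
            have hgexs : ∀ u ∈ xs, x ≤ u := fun u hu => List.rel_of_pairwise_cons hsa hu
            have hgeys : ∀ u ∈ ys, x ≤ u := fun u hu => List.rel_of_pairwise_cons hsb hu
            have hsplitA := countRun_split x xs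
            have hsplitB := countRun_split x ys
            have hgtA := countRun_gt x xs hsxs hgexs
            have hgtB := countRun_gt x ys hsys hgeys
            have hlenA : xs.length = (countRun x xs).1 + (countRun x xs).2.length := by
              conv_lhs => rw [hsplitA]
              simp
            have hlenB : ys.length = (countRun x ys).1 + (countRun x ys).2.length := by
              conv_lhs => rw [hsplitB]
              simp
            have hpA : (countRun x xs).2.Pairwise (· ≤ ·) :=
              List.Pairwise.sublist (List.IsSuffix.sublist ⟨_, hsplitA.symm⟩) hsxs
            have hpB : (countRun x ys).2.Pairwise (· ≤ ·) :=
              List.Pairwise.sublist (List.IsSuffix.sublist ⟨_, hsplitB.symm⟩) hsys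
            rw [ih (countRun x xs).2 (countRun x ys).2 hpA hpB (by omega) _]
            -- count of x in y::ys (= x::ys)
            have hcx : ((x :: ys).count x : Int) = ((countRun x ys).1 : Int) + 1 := by
              rw [List.count_cons, if_pos (by simp)]
              conv_lhs => rw [hsplitB]
              rw [List.count_append, List.count_replicate, if_pos (by simp),
                  List.count_eq_zero.mpr (fun hmem => absurd (hgtB x hmem) (by omega))]
              push_cast
              ring
            -- counts of the tail elements
            have hcong : ∀ t ∈ (countRun x xs).2,
                (((x :: ys).count t : Nat) : Int) = (((countRun x ys).2.count t : Nat) : Int) := by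
              intro t ht
              have hxt : x < t := hgtA t ht
              rw [List.count_cons, if_neg (by simp; omega)]
              conv_lhs => rw [hsplitB]
              rw [List.count_append, List.count_replicate, if_neg (by simp; omega)]
              simp
            -- expand the sum over x :: xs
            conv_rhs => rw [hsplitA]
            rw [List.map_cons, List.sum_cons, List.map_append, List.sum_append,
                List.map_replicate, List.sum_replicate, List.map_congr_left hcong]
            rw [nsmul_eq_mul, hcx]
            ring

-- ===== VERDICT (by name: the statement is the Claim_ definition above) =====
theorem solve_spec : Claim_equal_solve := by
  intro A B _
  unfold Spec_solve
  simp only [solve, solve_alt]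
  set n := A.toList.length with hn
  set lA := (A.toList.foldl stepCA ([], 0, false)).1 with hlA
  set lB := (B.toList.foldl stepCB ([], 0, 0)).1 with hlB
  set sA := PySem.List.sorted lA (fun x => x) false with hsA
  set sB := PySem.List.sorted lB (fun x => x) false with hsB
  have hA := scanA_corr A.toList (List.replicate (n+1) 0) [] 0 false
      (by intro _; simp only [List.length_replicate]; push_cast; omega)
      (by intro k hk; simp)
  have hB := scanB_corr n B.toList (List.replicate (n+1) 0) [] 0 0
      (by simp) (by intro k hk; simp)
  have hbd : ∀ a ∈ lA, 0 ≤ a ∧ a < ((n + 1 : Nat) : Int) := by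
    intro a ha
    rcases collectA_bound A.toList [] 0 false a ha with h | h
    · simp at h
    · constructor
      · exact h.1
      · push_cast
        push_cast at h
        omega
  -- left side: dot product of the two histograms = grouped sum
  rw [foldl_range_add (fun i =>
        ((A.toList.foldl stepA (List.replicate (n+1) 0, 0, false)).1.getD i 0) *
        ((B.toList.foldl (stepB n) (List.replicate (n+1) 0, 0, 0)).1.getD i 0)) 0 (n+1),
      zero_add]
  have hsum : ∑ i ∈ Finset.range (n+1),
        ((A.toList.foldl stepA (List.replicate (n+1) 0, 0, false)).1.getD i 0) *
        ((B.toList.foldl (stepB n) (List.replicate (n+1) 0, 0, 0)).1.getD i 0)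
      = ∑ i ∈ Finset.range (n+1),
          ((lA.count (i:Int) : Nat) : Int) * ((lB.count (i:Int) : Nat) : Int) := by
    apply Finset.sum_congr rfl
    intro i hi
    have hi' : i < n + 1 := Finset.mem_range.mp hi
    rw [hA.2 i (by simpa using hi'), hB.2 i hi']
  rw [hsum, ← group_sum lA lB (n+1) hbd]
  -- right side: the sorted merge computes the same per-element count sum
  have hperm : sA.Perm lA := PySem.List.sorted_perm lA (fun x => x) false
  have hpermB : sB.Perm lB := PySem.List.sorted_perm lB (fun x => x) false
  have hpa : sA.Pairwise (· ≤ ·) := PySem.List.sorted_pairwise lA (fun x => x)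
  have hpb : sB.Pairwise (· ≤ ·) := PySem.List.sorted_pairwise lB (fun x => x)
  rw [mergeFuel_spec (sA.length + sB.length) sA sB hpa hpb le_rfl 0, zero_add]
  have hcnt : ∀ x : Int, ((sB.count x : Nat) : Int) = ((lB.count x : Nat) : Int) := by
    intro x
    rw [hpermB.count_eq]
  calc (lA.map (fun x => ((lB.count x : Nat) : Int))).sum
      = (sA.map (fun x => ((lB.count x : Nat) : Int))).sum :=
        (List.Perm.sum_eq ((hperm.map _))).symm
    _ = (sA.map (fun x => ((sB.count x : Nat) : Int))).sum := by
        rw [List.map_congr_left (fun x _ => (hcnt x).symm)]
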